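-- pv_equiv track=rewrite | github.com/thealper2/codewars-solutions | 7-kyu/spinning_rings.py | spinning_rings
-- ===== SOURCE A (Python) =====
-- def spinning_rings(inner_max, outer_max):
--     inner, outer, moves = 0, 0, 0,
--     while True:
--         moves += 1
--         inner = (inner - 1) % (inner_max + 1)
--         outer = (outer + 1) % (outer_max + 1)
--         if inner == outer:
--             return moves
-- ===== SOURCE B (Python) =====
-- def _egcd(x, y):
--     # returns (g, p, q) with g = gcd(x, y) and x*p + y*q == g
--     if y == 0:
--         return (x, 1, 0)
--     g, p, q = _egcd(y, x % y)
--     return (g, q, p - (x // y) * q)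
--
--
-- def spinning_rings(inner_max, outer_max):
--     a = inner_max + 1
--     b = outer_max + 1
--     g = _egcd(a, b)[0]
--     bg = b // g
--     L = a * bg  # lcm(a, b): both rings are back at 0 after L moves
--     u = _egcd(a // g, bg)[1] % bg  # inverse of a//g modulo bg
--     step = g if g % 2 else g // 2  # a meeting value v must satisfy g | 2v
--     best = L
--     for v in range(0, min(a, b), step):
--         # smallest m >= 1 with m == -v (mod a) and m == v (mod b)
--         t = ((2 * v // g) * u) % bg
--         m = (-v + a * t) % L or L
--         if m < best:
--             best = m
--     return best
-- ===== Notes on version B (the rewrite author's own statement) =====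
-- stated objective: alternative
-- what changed: Instead of simulating both rings move by move until they coincide, B enumerates the candidate meeting values v (multiples of gcd/2 below min of the two ring sizes), solves the congruence pair m = -v (mod inner_max+1), m = v (mod outer_max+1) in closed form via an extended-gcd modular inverse, and returns the smallest positive solution; Pre_ restricts to the natural domain of nonnegative ring maxima (negative maxima, where A's Python negative-modulus wraparound values are accidental, and the ZeroDivisionError inputs inner_max=-1 / outer_max=-1 are excluded).
-- outside the precondition, e.g. on spinning_rings(-3, -4): A returns 5, B returns -6; on spinning_rings(2, -5): A returns 12, B returns 2; on spinning_rings(-4, 3): A returns 12, B returns -12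
import Mathlib
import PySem

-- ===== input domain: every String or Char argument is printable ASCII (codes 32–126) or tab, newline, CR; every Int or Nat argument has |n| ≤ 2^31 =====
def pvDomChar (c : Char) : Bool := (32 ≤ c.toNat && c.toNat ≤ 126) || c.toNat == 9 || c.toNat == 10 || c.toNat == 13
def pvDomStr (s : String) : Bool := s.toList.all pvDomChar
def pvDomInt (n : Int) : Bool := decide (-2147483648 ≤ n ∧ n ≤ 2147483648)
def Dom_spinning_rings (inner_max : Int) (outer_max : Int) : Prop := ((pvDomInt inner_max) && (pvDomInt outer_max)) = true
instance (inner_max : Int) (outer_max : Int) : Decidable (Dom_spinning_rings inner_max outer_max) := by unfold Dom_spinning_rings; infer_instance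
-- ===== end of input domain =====

-- B replaces A's step-by-step simulation of the two rings by a closed-form congruence
-- solve (extended gcd / modular inverse) over the possible meeting values; its loop is
-- bounded by min of the ring sizes instead of by the number of moves until the rings meet.

-- ===== PORT A =====
-- A's `while True` loop, ported with explicit fuel; within Pre_ the rings provably
-- meet within (inner_max+1)*(outer_max+1) moves, so the fuel branch is never reached
-- on admitted inputs.
def spinningLoop (inner_max outer_max : Int) : Nat → Int → Int → Int → Int
  | 0, _, _, moves => moves
  | fuel+1, inner, outer, moves =>
    let moves' := moves + 1
    let inner' := PySem.Int.mod (inner - 1) (inner_max + 1)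
    let outer' := PySem.Int.mod (outer + 1) (outer_max + 1)
    if inner' = outer' then moves' else spinningLoop inner_max outer_max fuel inner' outer' moves'

def spinning_rings (inner_max : Int) (outer_max : Int) : Int :=
  spinningLoop inner_max outer_max ((inner_max + 1) * (outer_max + 1)).natAbs 0 0 0

-- ===== PORT B =====
-- the recursive call's second argument is smaller in absolute value (Python's %)
theorem pvEgcdDec (x y : Int) (hy : ¬ y = 0) : (PySem.Int.mod x y).natAbs < y.natAbs := by
  rcases lt_or_gt_of_ne hy with h | h
  · have := PySem.Int.mod_neg_bounds x h
    omega
  · have h1 := PySem.Int.mod_nonneg x h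
    have h2 := PySem.Int.mod_lt x h
    omega

def egcd (x y : Int) : Int × Int × Int :=
  if hy : y = 0 then (x, 1, 0)
  else
    let r := egcd y (PySem.Int.mod x y)
    (r.1, r.2.2, r.2.1 - PySem.Int.floordiv x y * r.2.2)
termination_by y.natAbs
decreasing_by exact pvEgcdDec x y hy

def spinning_rings_alt (inner_max : Int) (outer_max : Int) : Int :=
  let a := inner_max + 1
  let b := outer_max + 1
  let g := (egcd a b).1
  let bg := PySem.Int.floordiv b g
  let L := a * bg
  let u := PySem.Int.mod (egcd (PySem.Int.floordiv a g) bg).2.1 bg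
  let step := if PySem.Int.mod g 2 ≠ 0 then g else PySem.Int.floordiv g 2
  (PySem.List.pyRange 0 (min a b) step).foldl (fun best v =>
      let t := PySem.Int.mod (PySem.Int.floordiv (2 * v) g * u) bg
      let m0 := PySem.Int.mod (-v + a * t) L
      let m := if m0 = 0 then L else m0
      if m < best then m else best) L

-- ===== PRECONDITION & SPEC =====
-- Pre_ is the natural domain of the puzzle: nonnegative ring maxima. It excludes
-- inner_max = -1 / outer_max = -1, where A raises ZeroDivisionError, and the other
-- negative maxima, where A's value is an accident of Python's negative-modulus
-- wraparound rather than a ring-meeting count.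
def Pre_spinning_rings (inner_max : Int) (outer_max : Int) : Prop :=
  0 ≤ inner_max ∧ 0 ≤ outer_max
instance (inner_max : Int) (outer_max : Int) : Decidable (Pre_spinning_rings inner_max outer_max) := by
  unfold Pre_spinning_rings; infer_instance

def pvWitness_spinning_rings : Int × Int := (2, 3)

def Spec_spinning_rings (inner_max : Int) (outer_max : Int) (out : Int) : Prop := out = spinning_rings_alt inner_max outer_max
instance (inner_max : Int) (outer_max : Int) (out : Int) : Decidable (Spec_spinning_rings inner_max outer_max out) := by unfold Spec_spinning_rings; infer_instance

-- ===== CLAIM (what is proved, stated in full; the proofs are below) =====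
def Claim_equal_spinning_rings : Prop := ∀ (inner_max : Int) (outer_max : Int), Dom_spinning_rings inner_max outer_max → Pre_spinning_rings inner_max outer_max → Spec_spinning_rings inner_max outer_max (spinning_rings inner_max outer_max)

-- ===== LEMMAS AND PROOFS =====

-- the rings coincide after m moves
def pvCond (A B m : Int) : Prop := PySem.Int.mod (-m) A = PySem.Int.mod m B

-- the value range of Python's x % n
def pvInR (v n : Int) : Prop := (0 < n → 0 ≤ v ∧ v < n) ∧ (n < 0 → n < v ∧ v ≤ 0)

theorem pvMod_spec (x n : Int) (hn : n ≠ 0) :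
    n ∣ (x - PySem.Int.mod x n) ∧ pvInR (PySem.Int.mod x n) n := by
  have hfm := PySem.Int.floordiv_mul_add_mod x n
  constructor
  · exact ⟨PySem.Int.floordiv x n, by linarith⟩
  · constructor
    · intro h; exact ⟨PySem.Int.mod_nonneg x h, PySem.Int.mod_lt x h⟩
    · intro h; exact ⟨(PySem.Int.mod_neg_bounds x h).1, (PySem.Int.mod_neg_bounds x h).2⟩

theorem pvMod_eq_iff (x n v : Int) (hn : n ≠ 0) :
    PySem.Int.mod x n = v ↔ n ∣ (x - v) ∧ pvInR v n := by
  obtain ⟨hdv, hr⟩ := pvMod_spec x n hn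
  constructor
  · rintro rfl; exact ⟨hdv, hr⟩
  · rintro ⟨hdv', hr'⟩
    obtain ⟨k1, hk1⟩ := hdv
    obtain ⟨k2, hk2⟩ := hdv'
    have hd : PySem.Int.mod x n - v = n * (k2 - k1) := by ring_nf; ring_nf at hk1 hk2; omega
    rcases lt_or_gt_of_ne hn with h | h
    · obtain ⟨a1, a2⟩ := hr.2 h
      obtain ⟨b1, b2⟩ := hr'.2 h
      rcases lt_trichotomy (k2 - k1) 0 with hk | hk | hk
      · nlinarith
      · rw [hk, mul_zero] at hd; omega
      · nlinarith
    · obtain ⟨a1, a2⟩ := hr.1 h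
      obtain ⟨b1, b2⟩ := hr'.1 h
      rcases lt_trichotomy (k2 - k1) 0 with hk | hk | hk
      · nlinarith
      · rw [hk, mul_zero] at hd; omega
      · nlinarith

-- characterization of a meeting after m moves through the common value v
theorem pvCond_iff (A B m : Int) (hA : A ≠ 0) (hB : B ≠ 0) :
    pvCond A B m ↔ ∃ v, pvInR v A ∧ pvInR v B ∧ |A| ∣ (m + v) ∧ |B| ∣ (m - v) := by
  constructor
  · intro h
    refine ⟨PySem.Int.mod m B, ?_, ?_, ?_, ?_⟩
    · have := (pvMod_spec (-m) A hA).2; rwa [h] at this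
    · exact (pvMod_spec m B hB).2
    · have hd := (pvMod_spec (-m) A hA).1
      rw [h] at hd
      rw [abs_dvd]
      have : m + PySem.Int.mod m B = -(-m - PySem.Int.mod m B) := by ring
      rw [this]
      exact dvd_neg.mpr hd
    · rw [abs_dvd]; exact (pvMod_spec m B hB).1
  · rintro ⟨v, hvA, hvB, hdA, hdB⟩
    rw [abs_dvd] at hdA hdB
    have h1 : PySem.Int.mod (-m) A = v := by
      rw [pvMod_eq_iff _ _ _ hA]
      exact ⟨by have := dvd_neg.mpr hdA; rwa [neg_add, ← sub_eq_add_neg] at this, hvA⟩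
    have h2 : PySem.Int.mod m B = v := by
      rw [pvMod_eq_iff _ _ _ hB]
      exact ⟨hdB, hvB⟩
    unfold pvCond; rw [h1, h2]

theorem pvCond_mul (A B : Int) (hA : A ≠ 0) (hB : B ≠ 0) : pvCond A B (|A| * |B|) := by
  unfold pvCond
  have hAd : A ∣ |A| * |B| := Dvd.dvd.mul_right (dvd_abs A A |>.mpr dvd_rfl) _
  have hBd : B ∣ |A| * |B| := Dvd.dvd.mul_left (dvd_abs B B |>.mpr dvd_rfl) _
  have h1 : PySem.Int.mod (-(|A| * |B|)) A = 0 := by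
    rw [PySem.Int.mod_eq_zero_iff_dvd]
    exact dvd_neg.mpr hAd
  have h2 : PySem.Int.mod (|A| * |B|) B = 0 := by
    rw [PySem.Int.mod_eq_zero_iff_dvd]
    exact hBd
  rw [h1, h2]

theorem pvMod_congr (x y n : Int) (hn : n ≠ 0) (h : n ∣ x - y) :
    PySem.Int.mod x n = PySem.Int.mod y n := by
  obtain ⟨hdv, hr⟩ := pvMod_spec x n hn
  rw [Eq.comm, pvMod_eq_iff _ _ _ hn]
  refine ⟨?_, hr⟩
  have : y - PySem.Int.mod x n = -(x - y) + (x - PySem.Int.mod x n) := by ring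
  rw [this]
  exact dvd_add (dvd_neg.mpr h) hdv

theorem pvLoop_eq (im om : Int) (hA : im + 1 ≠ 0) (hB : om + 1 ≠ 0)
    (N : Int) (hN1 : 1 ≤ N) (hNc : pvCond (im+1) (om+1) N)
    (hNmin : ∀ m, 1 ≤ m → pvCond (im+1) (om+1) m → N ≤ m) :
    ∀ (fuel : Nat) (moves : Int), 0 ≤ moves →
      (∀ k, 1 ≤ k → k ≤ moves → ¬ pvCond (im+1) (om+1) k) →
      N ≤ moves + fuel →
      spinningLoop im om fuel (PySem.Int.mod (-moves) (im+1)) (PySem.Int.mod moves (om+1)) moves = N := by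
  intro fuel
  induction fuel with
  | zero =>
    intro moves hm0 hprev hbound
    exact absurd hNc (hprev N hN1 (by omega))
  | succ f ih =>
    intro moves hm0 hprev hbound
    have hin : PySem.Int.mod (PySem.Int.mod (-moves) (im+1) - 1) (im+1)
        = PySem.Int.mod (-(moves+1)) (im+1) := by
      apply pvMod_congr _ _ _ hA
      have hd := (pvMod_spec (-moves) (im+1) hA).1
      have : PySem.Int.mod (-moves) (im+1) - 1 - -(moves+1)
          = -(-moves - PySem.Int.mod (-moves) (im+1)) := by ring
      rw [this]
      exact dvd_neg.mpr hd
    have hout : PySem.Int.mod (PySem.Int.mod moves (om+1) + 1) (om+1)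
        = PySem.Int.mod (moves+1) (om+1) := by
      apply pvMod_congr _ _ _ hB
      have hd := (pvMod_spec moves (om+1) hB).1
      have : PySem.Int.mod moves (om+1) + 1 - (moves+1)
          = -(moves - PySem.Int.mod moves (om+1)) := by ring
      rw [this]
      exact dvd_neg.mpr hd
    show (if PySem.Int.mod (PySem.Int.mod (-moves) (im+1) - 1) (im+1)
            = PySem.Int.mod (PySem.Int.mod moves (om+1) + 1) (om+1)
          then moves + 1
          else spinningLoop im om f
            (PySem.Int.mod (PySem.Int.mod (-moves) (im+1) - 1) (im+1))
            (PySem.Int.mod (PySem.Int.mod moves (om+1) + 1) (om+1)) (moves+1)) = N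
    rw [hin, hout]
    by_cases hc : pvCond (im+1) (om+1) (moves+1)
    · have heq : PySem.Int.mod (-(moves+1)) (im+1) = PySem.Int.mod (moves+1) (om+1) := hc
      rw [if_pos heq]
      have h1 : N ≤ moves + 1 := hNmin _ (by omega) hc
      have h2 : ¬ (N ≤ moves) := fun h => hprev N hN1 h hNc
      omega
    · have hne : ¬ (PySem.Int.mod (-(moves+1)) (im+1) = PySem.Int.mod (moves+1) (om+1)) := hc
      rw [if_neg hne]
      apply ih (moves+1) (by omega)
      · intro k hk1 hk2
        rcases eq_or_lt_of_le hk2 with h | h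
        · rw [h]; exact hc
        · exact hprev k hk1 (by omega)
      · omega

theorem pvA_eq_least (im om : Int) (hA : im + 1 ≠ 0) (hB : om + 1 ≠ 0)
    (N : Int) (hN1 : 1 ≤ N) (hNc : pvCond (im+1) (om+1) N)
    (hNmin : ∀ m, 1 ≤ m → pvCond (im+1) (om+1) m → N ≤ m) :
    spinning_rings im om = N := by
  have hm0A : PySem.Int.mod (-(0:Int)) (im+1) = 0 := by
    rw [neg_zero, PySem.Int.mod_eq_zero_iff_dvd]; exact dvd_zero _
  have hm0B : PySem.Int.mod (0:Int) (om+1) = 0 := by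
    rw [PySem.Int.mod_eq_zero_iff_dvd]; exact dvd_zero _
  have hbound : N ≤ 0 + (((im + 1) * (om + 1)).natAbs : Int) := by
    have := hNmin (|im+1| * |om+1|) ?_ (pvCond_mul _ _ hA hB)
    · rw [← abs_mul] at this
      have : |(im+1) * (om+1)| = (((im + 1) * (om + 1)).natAbs : Int) := Int.abs_eq_natAbs _
      omega
    · have := abs_pos.mpr hA
      have := abs_pos.mpr hB
      nlinarith
  have := pvLoop_eq im om hA hB N hN1 hNc hNmin ((im + 1) * (om + 1)).natAbs 0 le_rfl
    (by intro k hk1 hk2; omega) hbound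
  rw [hm0A, hm0B] at this
  exact this

-- ---- generic fold-min characterization (B's loop keeps the best candidate) ----
theorem pvFoldMin (f : Int → Int) (l : List Int) (init : Int) :
    (l.foldl (fun best w => if f w < best then f w else best) init = init ∨
      ∃ w ∈ l, l.foldl (fun best w => if f w < best then f w else best) init = f w)
    ∧ l.foldl (fun best w => if f w < best then f w else best) init ≤ init
    ∧ ∀ w ∈ l, l.foldl (fun best w => if f w < best then f w else best) init ≤ f w := by
  induction l generalizing init with
  | nil => simp
  | cons x t ih =>
    simp only [List.foldl_cons]
    obtain ⟨h1, h2, h3⟩ := ih (if f x < init then f x else init)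
    refine ⟨?_, ?_, ?_⟩
    · rcases h1 with h | ⟨w, hw, he⟩
      · by_cases hx : f x < init
        · right; exact ⟨x, List.mem_cons_self, by rw [h, if_pos hx]⟩
        · left; rw [h, if_neg hx]
      · right; exact ⟨w, List.mem_cons_of_mem _ hw, he⟩
    · refine le_trans h2 ?_
      split <;> omega
    · intro w hw
      rcases List.mem_cons.mp hw with rfl | hw'
      · refine le_trans h2 ?_
        split <;> omega
      · exact h3 w hw'

-- ---- extended gcd correctness ----
theorem pvGcdRec (x y : Int) : Int.gcd y (x % y) = Int.gcd x y := by
  rw [Int.emod_def, Int.gcd_comm, mul_comm]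
  exact Int.gcd_sub_mul_right_left y x (x / y)

theorem pvEgcd_spec : ∀ (n : Nat) (x y : Int), y.natAbs ≤ n → 0 ≤ x → 0 ≤ y →
    (egcd x y).1 = (Int.gcd x y : Int) ∧
    x * (egcd x y).2.1 + y * (egcd x y).2.2 = (egcd x y).1 := by
  intro n
  induction n with
  | zero =>
    intro x y hn hx hy
    have hy0 : y = 0 := by omega
    subst hy0
    have he : egcd x 0 = (x, 1, 0) := by rw [egcd]; simp
    rw [he]
    constructor
    · show x = (Int.gcd x 0 : Int)
      rw [Int.gcd_zero_right, Int.natAbs_of_nonneg hx]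
    · ring
  | succ n ih =>
    intro x y hn hx hy
    by_cases hy0 : y = 0
    · subst hy0
      have he : egcd x 0 = (x, 1, 0) := by rw [egcd]; simp
      rw [he]
      constructor
      · show x = (Int.gcd x 0 : Int)
        rw [Int.gcd_zero_right, Int.natAbs_of_nonneg hx]
      · ring
    · have hypos : 0 < y := lt_of_le_of_ne hy (Ne.symm hy0)
      rw [egcd, dif_neg hy0]
      have hmod : PySem.Int.mod x y = x % y := PySem.Int.mod_eq_emod_of_pos hypos
      have hfd : PySem.Int.floordiv x y = x / y := PySem.Int.floordiv_eq_ediv_of_pos hypos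
      have hnat : (PySem.Int.mod x y).natAbs ≤ n := by
        have := pvEgcdDec x y hy0; omega
      have hmnn : 0 ≤ PySem.Int.mod x y := PySem.Int.mod_nonneg x hypos
      obtain ⟨g1, g2⟩ := ih y (PySem.Int.mod x y) hnat hy hmnn
      constructor
      · show (egcd y (PySem.Int.mod x y)).1 = (Int.gcd x y : Int)
        rw [g1, hmod]
        exact_mod_cast congrArg (Nat.cast : Nat → Int) (pvGcdRec x y)
      · show x * (egcd y (PySem.Int.mod x y)).2.2 +
            y * ((egcd y (PySem.Int.mod x y)).2.1 -
              PySem.Int.floordiv x y * (egcd y (PySem.Int.mod x y)).2.2) =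
            (egcd y (PySem.Int.mod x y)).1
        rw [hmod, hfd]
        rw [hmod] at g2
        have he : x % y = x - y * (x / y) := Int.emod_def x y
        linear_combination g2 - (egcd y (x % y)).2.2 * he

-- ---- the closed-form congruence solution: existence/bounds and minimality ----
theorem pvSolve_spec (a b g bg ag u L v : Int)
    (ha : 1 ≤ a) (hg1 : 1 ≤ g) (hbg1 : 1 ≤ bg)
    (hag : a = g * ag) (hbg : b = g * bg) (hL : L = a * bg)
    (hu : bg ∣ ag * u - 1) (hgv : g ∣ 2 * v) :
    ∀ m, m = (if (-v + a * ((2 * v) / g * u % bg)) % L = 0 then L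
              else (-v + a * ((2 * v) / g * u % bg)) % L) →
    1 ≤ m ∧ m ≤ L ∧ a ∣ (m + v) ∧ b ∣ (m - v) := by
  intro m hm
  have hL1 : 1 ≤ L := by nlinarith
  set X : Int := (2 * v) / g * u with hX
  set t : Int := X % bg with ht
  set m0 : Int := (-v + a * t) % L with hm0
  have hq1 : m0 = (-v + a * t) - L * ((-v + a * t) / L) := Int.emod_def _ _
  have hm0nn : 0 ≤ m0 := Int.emod_nonneg _ (by omega)
  have hm0lt : m0 < L := Int.emod_lt_of_pos _ (by omega)
  have hmrange : 1 ≤ m ∧ m ≤ L := by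
    rw [hm]
    split_ifs with h
    · omega
    · omega
  have hd : 2 * v = g * (2 * v / g) := (Int.mul_ediv_cancel' hgv).symm
  obtain ⟨k3, hk3⟩ := hu
  have hqt : X - t = bg * (X / bg) := by rw [ht, Int.emod_def]; ring
  have haL : a ∣ L := ⟨bg, hL⟩
  have hbL : b ∣ L := ⟨ag, by rw [hL, hag, hbg]; ring⟩
  have hbX : b ∣ a * X - 2 * v := by
    refine ⟨(2 * v / g) * k3, ?_⟩
    rw [hX]
    linear_combination (2 * v / g * u) * hag - hd + g * (2 * v / g) * hk3 - (2 * v / g) * k3 * hbg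
  have hbt : b ∣ a * t - 2 * v := by
    have h1 : a * t - 2 * v = (a * X - 2 * v) - a * (X - t) := by ring
    rw [h1, hqt]
    refine dvd_sub hbX ?_
    have : a * (bg * (X / bg)) = L * (X / bg) := by rw [hL]; ring
    rw [this]
    exact Dvd.dvd.mul_right hbL _
  have hmm0 : m - m0 = 0 ∨ m - m0 = L := by
    by_cases hz : m0 = 0
    · right; rw [hm, if_pos hz]; omega
    · left; rw [hm, if_neg hz]; omega
  have hmm0d : ∀ c : Int, c ∣ L → c ∣ m - m0 := by
    intro c hc
    rcases hmm0 with h | h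
    · rw [h]; exact dvd_zero c
    · rw [h]; exact hc
  constructor
  · exact hmrange.1
  constructor
  · exact hmrange.2
  constructor
  · have : m + v = (m - m0) + (m0 + v - a * t) + a * t := by ring
    rw [this]
    refine dvd_add (dvd_add (hmm0d a haL) ?_) (Dvd.dvd.mul_right dvd_rfl t)
    have : m0 + v - a * t = -(L * ((-v + a * t) / L)) := by omega
    rw [this]
    exact dvd_neg.mpr (Dvd.dvd.mul_right haL _)
  · have : m - v = (m - m0) + (m0 + v - a * t) + (a * t - 2 * v) := by ring
    rw [this]
    refine dvd_add (dvd_add (hmm0d b hbL) ?_) hbt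
    have : m0 + v - a * t = -(L * ((-v + a * t) / L)) := by omega
    rw [this]
    exact dvd_neg.mpr (Dvd.dvd.mul_right hbL _)

theorem pvSolve_min (a b g L m v : Int) (ha : 1 ≤ a) (hb : 1 ≤ b)
    (hgcd : g = (Int.gcd a b : Int)) (hLg : L * g = a * b)
    (hm1 : 1 ≤ m) (hmL : m ≤ L) (hma : a ∣ m + v) (hmb : b ∣ m - v) :
    ∀ s, 1 ≤ s → a ∣ s + v → b ∣ s - v → m ≤ s := by
  intro s hs1 hsa hsb
  have hda : a ∣ s - m := by
    have : s - m = (s + v) - (m + v) := by ring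
    rw [this]; exact dvd_sub hsa hma
  have hdb : b ∣ s - m := by
    have : s - m = (s - v) - (m - v) := by ring
    rw [this]; exact dvd_sub hsb hmb
  have hlcm : ((Int.lcm a b : Nat) : Int) ∣ s - m := Int.coe_lcm_dvd hda hdb
  have hgl : (Int.gcd a b : Int) * (Int.lcm a b : Nat) = a * b := by
    have h := Nat.gcd_mul_lcm a.natAbs b.natAbs
    have ha' : (a.natAbs : Int) = a := by omega
    have hb' : (b.natAbs : Int) = b := by omega
    calc (Int.gcd a b : Int) * (Int.lcm a b : Nat)
        = ((Nat.gcd a.natAbs b.natAbs * Nat.lcm a.natAbs b.natAbs : Nat) : Int) := by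
          rw [Int.gcd, Int.lcm]; push_cast; ring
      _ = ((a.natAbs * b.natAbs : Nat) : Int) := by rw [h]
      _ = a * b := by
          push_cast
          rw [abs_of_pos (by omega : (0:Int) < a), abs_of_pos (by omega : (0:Int) < b)]
  have hLlcm : L = ((Int.lcm a b : Nat) : Int) := by
    have hgpos : 0 < (Int.gcd a b : Int) := by
      have h2 : a ≠ 0 := by omega
      exact_mod_cast Int.gcd_pos_iff.mpr (Or.inl h2)
    have : L * g = ((Int.lcm a b : Nat) : Int) * g := by
      rw [hLg, hgcd]; linarith [hgl, mul_comm ((Int.gcd a b : Nat) : Int) ((Int.lcm a b : Nat) : Int)]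
    have hgne : g ≠ 0 := by rw [hgcd]; omega
    exact mul_right_cancel₀ hgne this
  rw [← hLlcm] at hlcm
  obtain ⟨k, hk⟩ := hlcm
  have hL1 : 1 ≤ L := by omega
  rcases lt_trichotomy k 0 with h | h | h
  · nlinarith
  · rw [h] at hk; omega
  · nlinarith

-- the Python B loop strides over exactly the residues v with g | 2v
theorem pvStep_iff (g step : Int) (hg1 : 1 ≤ g)
    (hs : step = if PySem.Int.mod g 2 ≠ 0 then g else PySem.Int.floordiv g 2) :
    0 < step ∧ ∀ w : Int, step ∣ w ↔ g ∣ 2 * w := by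
  have hm2 : PySem.Int.mod g 2 = g % 2 := PySem.Int.mod_eq_emod_of_pos (by norm_num)
  have hfd : PySem.Int.floordiv g 2 = g / 2 := PySem.Int.floordiv_eq_ediv_of_pos (by norm_num)
  by_cases hpar : g % 2 = 0
  · have hsv : step = g / 2 := by
      rw [hs, hm2, hfd, if_neg (by omega)]
    have hg2 : g = 2 * step := by omega
    refine ⟨by omega, ?_⟩
    intro w
    constructor
    · rintro ⟨k, rfl⟩
      exact ⟨k, by rw [hg2]; ring⟩
    · rintro ⟨k, hk⟩
      refine ⟨k, ?_⟩
      rw [hg2] at hk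
      have h2 : 2 * w = 2 * (step * k) := by linear_combination hk
      generalize hp : step * k = pq at h2 ⊢
      omega
  · have hsv : step = g := by rw [hs, hm2, if_pos (by omega)]
    subst hsv
    refine ⟨by omega, ?_⟩
    intro w
    constructor
    · rintro ⟨k, rfl⟩
      exact ⟨2 * k, by ring⟩
    · rintro ⟨k, hk⟩
      have hodd : step % 2 = 1 := by omega
      have hc : step = 2 * (step / 2) + 1 := by omega
      have hkpar : k % 2 = 0 := by
        by_contra hk1
        have hk1' : k = 2 * (k / 2) + 1 := by omega
        rw [hc, hk1'] at hk
        have hexp : (2 * (step / 2) + 1) * (2 * (k / 2) + 1)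
            = 4 * ((step / 2) * (k / 2)) + 2 * (step / 2) + 2 * (k / 2) + 1 := by ring
        rw [hexp] at hk
        generalize (step / 2) * (k / 2) = e at hk
        omega
      have hk2 : k = 2 * (k / 2) := by omega
      refine ⟨k / 2, ?_⟩
      rw [hk2] at hk
      have h2 : 2 * w = 2 * (step * (k / 2)) := by linear_combination hk
      generalize hp : step * (k / 2) = pq at h2 ⊢
      omega

theorem pvB_eq_least (im om : Int) (hA : 0 ≤ im) (hB : 0 ≤ om)
    (N : Int) (hN1 : 1 ≤ N) (hNc : pvCond (im+1) (om+1) N)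
    (hNmin : ∀ m, 1 ≤ m → pvCond (im+1) (om+1) m → N ≤ m) :
    spinning_rings_alt im om = N := by
  unfold spinning_rings_alt
  set a : Int := im + 1 with haDef
  set b : Int := om + 1 with hbDef
  set g : Int := (egcd a b).1 with hgDef
  set bg : Int := PySem.Int.floordiv b g with hbgDef
  set L : Int := a * bg with hLDef
  set p : Int := (egcd (PySem.Int.floordiv a g) bg).2.1 with hpDef
  set u : Int := PySem.Int.mod p bg with huDef
  set step : Int := (if PySem.Int.mod g 2 ≠ 0 then g else PySem.Int.floordiv g 2) with hstepDef
  have hAne : a ≠ 0 := by omega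
  have hBne : b ≠ 0 := by omega
  have ha1 : 1 ≤ a := by omega
  have hb1 : 1 ≤ b := by omega
  obtain ⟨hgeq, _⟩ := pvEgcd_spec b.natAbs a b le_rfl (by omega) (by omega)
  rw [← hgDef] at hgeq
  have hgcdpos : 0 < Int.gcd a b := Int.gcd_pos_iff.mpr (Or.inl (by omega))
  have hg1 : 1 ≤ g := by rw [hgeq]; omega
  have hga : g ∣ a := by rw [hgeq]; exact Int.gcd_dvd_left _ _
  have hgb : g ∣ b := by rw [hgeq]; exact Int.gcd_dvd_right _ _
  have hbg' : bg = b / g := by rw [hbgDef]; exact PySem.Int.floordiv_eq_ediv_of_pos (by omega)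
  have hbg : b = g * bg := by rw [hbg']; exact (Int.mul_ediv_cancel' hgb).symm
  have hag' : PySem.Int.floordiv a g = a / g := PySem.Int.floordiv_eq_ediv_of_pos (by omega)
  have hag : a = g * (a / g) := (Int.mul_ediv_cancel' hga).symm
  have hbg1 : 1 ≤ bg := by nlinarith
  have hL1 : 1 ≤ L := by rw [hLDef]; nlinarith
  -- the modular inverse u of a/g modulo bg, via the second egcd call
  obtain ⟨hco1, hbez⟩ := pvEgcd_spec bg.natAbs (a / g) bg le_rfl
    (Int.ediv_nonneg (by omega) (by omega)) (by omega)
  have hco : Int.gcd (a / g) bg = 1 := by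
    rw [hbg', hgeq]
    exact Int.gcd_div_gcd_div_gcd hgcdpos
  rw [hag'] at hpDef
  rw [← hpDef] at hbez
  rw [hco] at hco1
  rw [hco1] at hbez
  have hu2 : u = p % bg := by rw [huDef]; exact PySem.Int.mod_eq_emod_of_pos (by omega)
  have hpu : p - u = bg * (p / bg) := by rw [hu2, Int.emod_def]; ring
  have hu : bg ∣ (a / g) * u - 1 := by
    refine ⟨-(a / g) * (p / bg) - (egcd (a / g) bg).2.2, ?_⟩
    push_cast at hbez
    linear_combination hbez - a / g * hpu
  obtain ⟨hsteppos, hstepdvd⟩ := pvStep_iff g step hg1 hstepDef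
  show (PySem.List.pyRange 0 (min a b) step).foldl
      (fun best v =>
        if (if PySem.Int.mod (-v + a * PySem.Int.mod (PySem.Int.floordiv (2 * v) g * u) bg) L = 0
            then L
            else PySem.Int.mod (-v + a * PySem.Int.mod (PySem.Int.floordiv (2 * v) g * u) bg) L) < best
        then (if PySem.Int.mod (-v + a * PySem.Int.mod (PySem.Int.floordiv (2 * v) g * u) bg) L = 0
              then L
              else PySem.Int.mod (-v + a * PySem.Int.mod (PySem.Int.floordiv (2 * v) g * u) bg) L)
        else best) L = N
  -- rewrite the candidate function into pure Int arithmetic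
  have hfun : ∀ v : Int,
      (if PySem.Int.mod (-v + a * PySem.Int.mod (PySem.Int.floordiv (2 * v) g * u) bg) L = 0
       then L
       else PySem.Int.mod (-v + a * PySem.Int.mod (PySem.Int.floordiv (2 * v) g * u) bg) L)
      = (if (-v + a * ((2 * v) / g * u % bg)) % L = 0
         then L
         else (-v + a * ((2 * v) / g * u % bg)) % L) := by
    intro v
    rw [PySem.Int.floordiv_eq_ediv_of_pos (by omega : (0:Int) < g),
        PySem.Int.mod_eq_emod_of_pos (by omega : (0:Int) < bg),
        PySem.Int.mod_eq_emod_of_pos (by omega : (0:Int) < L)]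
  -- properties of every candidate the loop considers
  have hsol : ∀ v : Int, v ∈ PySem.List.pyRange 0 (min a b) step →
      ∀ m : Int,
      m = (if PySem.Int.mod (-v + a * PySem.Int.mod (PySem.Int.floordiv (2 * v) g * u) bg) L = 0
           then L
           else PySem.Int.mod (-v + a * PySem.Int.mod (PySem.Int.floordiv (2 * v) g * u) bg) L) →
      1 ≤ m ∧ m ≤ L ∧ a ∣ (m + v) ∧ b ∣ (m - v) := by
    intro v hv m hm
    rw [hfun v] at hm
    obtain ⟨hv0, hvhi, hvdvd⟩ := (PySem.List.mem_pyRange_iff_of_pos hsteppos v).mp hv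
    have hgv : g ∣ 2 * v := by
      rw [← hstepdvd]
      simpa using hvdvd
    exact pvSolve_spec a b g bg (a / g) u L v ha1 hg1 hbg1 hag hbg hLDef hu hgv m hm
  have hcondL : pvCond (im+1) (om+1) L := by
    rw [pvCond_iff _ _ _ hAne hBne]
    refine ⟨0, ?_, ?_, ?_, ?_⟩
    · exact ⟨fun _ => by omega, fun _ => by omega⟩
    · exact ⟨fun _ => by omega, fun _ => by omega⟩
    · rw [add_zero, abs_of_pos (by omega : (0:Int) < im + 1)]
      exact ⟨bg, hLDef⟩
    · rw [sub_zero, abs_of_pos (by omega : (0:Int) < om + 1)]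
      refine ⟨a / g, ?_⟩
      rw [← hbDef, hbg]
      linear_combination bg * hag
  have hgcd' : g = (Int.gcd a b : Int) := hgeq
  have hLg : L * g = a * b := by rw [hLDef, hbg]; ring
  -- the fold is the minimum of L and the candidates
  obtain ⟨hOr, hLe, hAll⟩ := pvFoldMin
    (fun v => (if PySem.Int.mod (-v + a * PySem.Int.mod (PySem.Int.floordiv (2 * v) g * u) bg) L = 0
               then L
               else PySem.Int.mod (-v + a * PySem.Int.mod (PySem.Int.floordiv (2 * v) g * u) bg) L))
    (PySem.List.pyRange 0 (min a b) step) L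
  -- lower bound: every value the fold can return satisfies the meeting condition
  have hlb : N ≤ (PySem.List.pyRange 0 (min a b) step).foldl
      (fun best v =>
        if (if PySem.Int.mod (-v + a * PySem.Int.mod (PySem.Int.floordiv (2 * v) g * u) bg) L = 0
            then L
            else PySem.Int.mod (-v + a * PySem.Int.mod (PySem.Int.floordiv (2 * v) g * u) bg) L) < best
        then (if PySem.Int.mod (-v + a * PySem.Int.mod (PySem.Int.floordiv (2 * v) g * u) bg) L = 0
              then L
              else PySem.Int.mod (-v + a * PySem.Int.mod (PySem.Int.floordiv (2 * v) g * u) bg) L)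
        else best) L := by
    rcases hOr with h | ⟨v, hv, he⟩
    · rw [h]
      exact hNmin L (by omega) hcondL
    · rw [he]
      obtain ⟨hm1, hmL, hma, hmb⟩ := hsol v hv _ rfl
      refine hNmin _ hm1 ?_
      rw [pvCond_iff _ _ _ hAne hBne]
      obtain ⟨hv0, hvhi, _⟩ := (PySem.List.mem_pyRange_iff_of_pos hsteppos v).mp hv
      refine ⟨v, ⟨fun _ => by omega, fun _ => by omega⟩, ⟨fun _ => by omega, fun _ => by omega⟩, ?_, ?_⟩
      · rw [abs_of_pos (by omega : (0:Int) < im + 1)]; exact hma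
      · rw [abs_of_pos (by omega : (0:Int) < om + 1)]; exact hmb
  -- upper bound: the loop tries the residue of the true first meeting
  have hub : (PySem.List.pyRange 0 (min a b) step).foldl
      (fun best v =>
        if (if PySem.Int.mod (-v + a * PySem.Int.mod (PySem.Int.floordiv (2 * v) g * u) bg) L = 0
            then L
            else PySem.Int.mod (-v + a * PySem.Int.mod (PySem.Int.floordiv (2 * v) g * u) bg) L) < best
        then (if PySem.Int.mod (-v + a * PySem.Int.mod (PySem.Int.floordiv (2 * v) g * u) bg) L = 0
              then L
              else PySem.Int.mod (-v + a * PySem.Int.mod (PySem.Int.floordiv (2 * v) g * u) bg) L)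
        else best) L ≤ N := by
    obtain ⟨v, hvA, hvB, hdA, hdB⟩ := (pvCond_iff _ _ _ hAne hBne).mp hNc
    rw [abs_of_pos (by omega : (0:Int) < im + 1)] at hdA
    rw [abs_of_pos (by omega : (0:Int) < om + 1)] at hdB
    have hgv : g ∣ 2 * v := by
      have h1 : g ∣ (N + v) := dvd_trans hga hdA
      have h2 : g ∣ (N - v) := dvd_trans hgb hdB
      have he : 2 * v = (N + v) - (N - v) := by ring
      rw [he]
      exact dvd_sub h1 h2
    obtain ⟨hvA1, hvA2⟩ := hvA.1 (by omega)
    obtain ⟨hvB1, hvB2⟩ := hvB.1 (by omega)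
    have hvmem : v ∈ PySem.List.pyRange 0 (min a b) step := by
      rw [PySem.List.mem_pyRange_iff_of_pos hsteppos]
      refine ⟨by omega, by omega, ?_⟩
      have he : v - 0 = v := by ring
      rw [he, hstepdvd]
      exact hgv
    have hAllv := hAll _ hvmem
    obtain ⟨hm1, hmL, hma, hmb⟩ := hsol _ hvmem _ rfl
    exact le_trans hAllv (pvSolve_min a b g L _ v ha1 hb1 hgcd' hLg hm1 hmL hma hmb N hN1 hdA hdB)
  omega

theorem pvLeast_exists (A B : Int) (hA : A ≠ 0) (hB : B ≠ 0) :
    ∃ N : Int, 1 ≤ N ∧ pvCond A B N ∧ ∀ m, 1 ≤ m → pvCond A B m → N ≤ m := by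
  have hpos : 1 ≤ |A| * |B| := by
    have := abs_pos.mpr hA
    have := abs_pos.mpr hB
    nlinarith
  have hP : ∃ k : Nat, pvCond A B ((k : Int) + 1) := by
    refine ⟨(|A| * |B|).toNat - 1, ?_⟩
    have : ((((|A| * |B|).toNat - 1 : Nat)) : Int) + 1 = |A| * |B| := by omega
    rw [this]; exact pvCond_mul A B hA hB
  classical
  refine ⟨(Nat.find hP : Int) + 1, by omega, Nat.find_spec hP, ?_⟩
  intro m hm hc
  have hk : pvCond A B (((m.toNat - 1 : Nat) : Int) + 1) := by
    have : (((m.toNat - 1 : Nat)) : Int) + 1 = m := by omega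
    rw [this]; exact hc
  have := Nat.find_min' hP hk
  omega

-- ===== VERDICT (by name: the statement is the Claim_ definition above) =====
theorem spinning_rings_spec : Claim_equal_spinning_rings := by
  intro im om _hdom hpre
  obtain ⟨hA, hB⟩ := hpre
  have hA' : im + 1 ≠ 0 := by omega
  have hB' : om + 1 ≠ 0 := by omega
  obtain ⟨N, hN1, hNc, hNmin⟩ := pvLeast_exists (im+1) (om+1) hA' hB'
  unfold Spec_spinning_rings
  rw [pvA_eq_least im om hA' hB' N hN1 hNc hNmin, pvB_eq_least im om hA hB N hN1 hNc hNmin]
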